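-- pv_equiv track=rewrite | github.com/librar127/PythonDS | B2BSWE/Arrays/valid_sudoku_move.py | validate_row_block
-- ===== SOURCE A (Python) =====
-- def validate_row_block(row):
--     hashset = set()
--
--     for each in row:
--         if each == 0:
--             continue
--         if each in hashset:
--             return False
--         else:
--             hashset.add(each)
--
--     return True
-- ===== SOURCE B (Python) =====
-- def validate_row_block(row):
--     s = sorted(x for x in row if x != 0)
--     return all(a != b for a, b in zip(s, s[1:]))
-- ===== Notes on version B (the rewrite author's own statement) =====
-- stated objective: alternative
-- what changed: Replaces the incremental hash-set membership loop with a sort-then-scan: sort the nonzero entries and check that no two adjacent sorted elements are equal; no set, no membership test, no early return.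
import Mathlib
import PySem

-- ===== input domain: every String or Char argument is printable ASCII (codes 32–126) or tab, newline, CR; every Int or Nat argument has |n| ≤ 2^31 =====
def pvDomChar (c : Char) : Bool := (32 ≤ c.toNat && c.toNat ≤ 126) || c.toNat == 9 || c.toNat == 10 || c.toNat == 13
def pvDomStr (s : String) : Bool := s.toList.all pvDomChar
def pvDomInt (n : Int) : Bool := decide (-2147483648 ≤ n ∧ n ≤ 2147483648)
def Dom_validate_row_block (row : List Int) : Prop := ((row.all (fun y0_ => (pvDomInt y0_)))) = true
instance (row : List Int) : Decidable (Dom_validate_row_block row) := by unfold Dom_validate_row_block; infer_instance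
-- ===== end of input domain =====

-- B replaces A's incremental hash-set loop (with early return) by sorting the
-- nonzero entries and checking that no two adjacent sorted elements are equal.


-- ===== PORT A =====
-- the loop over `row` carrying `hashset`, with the early `return False`
def validateGoA (hashset : PySem.Set Int) : List Int → Bool
  | [] => true
  | each :: rest =>
    if each = 0 then validateGoA hashset rest
    else if hashset.contains each then false
    else validateGoA (hashset.add each) rest

def validate_row_block (row : List Int) : Bool :=
  validateGoA PySem.Set.empty row

-- ===== PORT B =====
-- s = sorted(x for x in row if x != 0); all(a != b for a, b in zip(s, s[1:]))
def validate_row_block_alt (row : List Int) : Bool :=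
  let s := PySem.List.sorted (row.filter (fun x => decide (x ≠ 0))) (fun x => x) false
  (s.zip s.tail).all (fun p => decide (p.1 ≠ p.2))

-- ===== PRECONDITION & SPEC =====
def Spec_validate_row_block (row : List Int) (out : Bool) : Prop := out = validate_row_block_alt row
instance (row : List Int) (out : Bool) : Decidable (Spec_validate_row_block row out) := by unfold Spec_validate_row_block; infer_instance

-- ===== CLAIM (what is proved, stated in full; the proofs are below) =====
def Claim_equal_validate_row_block : Prop := ∀ (row : List Int), Dom_validate_row_block row → Spec_validate_row_block row (validate_row_block row)

-- ===== LEMMAS AND PROOFS =====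

-- characterisation of A's loop: distinct nonzero tail elements, none already in the running set
lemma validateGoA_spec (rest : List Int) : ∀ (s : PySem.Set Int),
    validateGoA s rest =
      decide ((rest.filter (fun x => decide (x ≠ 0))).Nodup ∧
              ∀ x ∈ rest, x ≠ 0 → x ∉ s) := by
  induction rest with
  | nil => intro s; simp [validateGoA]
  | cons x rest ih =>
    intro s
    by_cases h0 : x = 0
    · subst h0
      simp only [validateGoA, ih]
      apply decide_eq_decide.mpr
      constructor
      · rintro ⟨hn, hall⟩
        refine ⟨by simpa using hn, ?_⟩
        rintro y hy hy0
        rcases List.mem_cons.mp hy with hy | hy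
        · exact absurd hy hy0
        · exact hall y hy hy0
      · rintro ⟨hn, hall⟩
        refine ⟨by simpa using hn, ?_⟩
        intro y hy hy0
        exact hall y (List.mem_cons_of_mem _ hy) hy0
    · by_cases hmem : x ∈ s
      · have hc : s.contains x = true := (PySem.Set.contains_iff s x).mpr hmem
        simp only [validateGoA, if_neg h0, hc, if_true]
        symm
        apply decide_eq_false
        rintro ⟨_, hall⟩
        exact hall x (List.mem_cons_self) h0 hmem
      · have hc : s.contains x = false :=
          Bool.eq_false_iff.mpr (fun h => hmem ((PySem.Set.contains_iff s x).mp h))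
        simp only [validateGoA, if_neg h0, hc, Bool.false_eq_true, if_false, ih]
        apply decide_eq_decide.mpr
        constructor
        · rintro ⟨hn, hall⟩
          have hxnotin : x ∉ rest.filter (fun x => decide (x ≠ 0)) := by
            intro hcontra
            rcases List.mem_filter.mp hcontra with ⟨hin, _⟩
            exact (hall x hin h0) ((PySem.Set.mem_add s x x).mpr (Or.inr rfl))
          constructor
          · rw [List.filter_cons_of_pos (by simpa using h0)]
            exact List.nodup_cons.mpr ⟨hxnotin, hn⟩
          · rintro y hy hy0
            rcases List.mem_cons.mp hy with hy | hy
            · exact hy ▸ hmem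
            · intro hyin
              exact hall y hy hy0 ((PySem.Set.mem_add s x y).mpr (Or.inl hyin))
        · rintro ⟨hn, hall⟩
          rw [List.filter_cons_of_pos (by simpa using h0)] at hn
          rcases List.nodup_cons.mp hn with ⟨hxnotin, hn'⟩
          refine ⟨hn', ?_⟩
          intro y hy hy0 hyin
          rcases (PySem.Set.mem_add s x y).mp hyin with hys | hyx
          · exact hall y (List.mem_cons_of_mem _ hy) hy0 hys
          · subst hyx
            exact hxnotin (List.mem_filter.mpr ⟨hy, by simpa using hy0⟩)

-- on a (≤)-sorted list, "no two adjacent elements equal" is exactly Nodup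
lemma zip_tail_ne_iff_nodup : ∀ (s : List Int), s.Pairwise (· ≤ ·) →
    ((s.zip s.tail).all (fun p => decide (p.1 ≠ p.2)) = decide s.Nodup) := by
  intro s
  induction s with
  | nil => intro _; simp
  | cons x t ih =>
    intro hp
    rcases List.pairwise_cons.mp hp with ⟨hxle, hpt⟩
    cases t with
    | nil => simp
    | cons y u =>
      have ihr := ih hpt
      simp only [List.tail_cons] at ihr
      simp only [List.tail_cons, List.zip_cons_cons, List.all_cons, ihr]
      apply Bool.eq_iff_iff.mpr
      simp only [Bool.and_eq_true, decide_eq_true_eq]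
      constructor
      · rintro ⟨hxy, hnod⟩
        refine List.nodup_cons.mpr ⟨?_, hnod⟩
        intro hx
        have hylt : x < y := lt_of_le_of_ne (hxle y List.mem_cons_self) hxy
        rcases List.mem_cons.mp hx with h | h
        · exact hxy h
        · -- x ∈ u, but y ≤ every element of u and x < y
          have := (List.pairwise_cons.mp hpt).1 x h
          omega
      · intro hnod
        rcases List.nodup_cons.mp hnod with ⟨hxnotin, hnt⟩
        exact ⟨fun h => hxnotin (h ▸ List.mem_cons_self), hnt⟩

-- ===== VERDICT (by name: the statement is the Claim_ definition above) =====
theorem validate_row_block_spec : Claim_equal_validate_row_block := by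
  intro row _
  unfold Spec_validate_row_block validate_row_block validate_row_block_alt
  rw [validateGoA_spec]
  set f := row.filter (fun x => decide (x ≠ 0)) with hf
  set s := PySem.List.sorted f (fun x => x) false with hs
  have hperm : s.Perm f := PySem.List.sorted_perm f (fun x => x) false
  have hpair : s.Pairwise (· ≤ ·) := by
    have := PySem.List.sorted_pairwise f (fun x => x)
    simpa [hs] using this
  rw [zip_tail_ne_iff_nodup s hpair]
  apply decide_eq_decide.mpr
  constructor
  · rintro ⟨hn, _⟩; exact hperm.nodup_iff.mpr hn
  · intro h
    exact ⟨hperm.nodup_iff.mp h, by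
      intro x _ _ hx
      simp [PySem.Set.empty] at hx⟩
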